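-- pv_equiv track=rewrite | github.com/caleb531/youversion-suggest-alfred | search_bible_reference.py | guess_version
-- ===== SOURCE A (Python) =====
-- all_versions = (
-- 	'AMP',
-- 	'ASV',
-- 	'BOOKS',
-- 	'CEB',
-- 	'CEV',
-- 	'CEV',
-- 	'CEVUK',
-- 	'CPDV',
-- 	'DARBY',
-- 	'DRA',
-- 	'ESV',
-- 	'ERV',
-- 	'GNB',
-- 	'GNBDC',
-- 	'GNBDK',
-- 	'GNT',
-- 	'GNTD',
-- 	'GWT',
-- 	'HCSB',
-- 	'ISR98',
-- 	'KJV',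
-- 	'LEB',
-- 	'MSG',
-- 	'NIV',
-- 	'NIVUK',
-- 	'NLT',
-- 	'NET',
-- 	'NKJV',
-- 	'NCV',
-- 	'NASB',
-- 	'NABRE',
-- 	'NIRV',
-- 	'OJB',
-- 	'RV1885',
-- 	'TLV',
-- 	'WEB'
-- )
--
-- default_version = 'NIV'
--
-- def guess_version(text):
-- 		text = text.upper()
--
-- 		if text in all_versions:
-- 			version_guess = text
-- 		else:
-- 			# Use a predetermined version by default
-- 			version_guess = default_version
-- 			if text != '':
-- 				# Attempt to guess the version used
-- 				for version in all_versions: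
-- 					if version.startswith(text):
-- 						version_guess = version
-- 						break
--
-- 		return version_guess
-- ===== SOURCE B (Python) =====
-- all_versions = (
-- 	'AMP', 'ASV', 'BOOKS', 'CEB', 'CEV', 'CEV', 'CEVUK', 'CPDV', 'DARBY',
-- 	'DRA', 'ESV', 'ERV', 'GNB', 'GNBDC', 'GNBDK', 'GNT', 'GNTD', 'GWT',
-- 	'HCSB', 'ISR98', 'KJV', 'LEB', 'MSG', 'NIV', 'NIVUK', 'NLT', 'NET',
-- 	'NKJV', 'NCV', 'NASB', 'NABRE', 'NIRV', 'OJB', 'RV1885', 'TLV', 'WEB'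
-- )
--
-- default_version = 'NIV'
--
-- # Precomputed index: every nonempty prefix of a version maps to the first
-- # version (in tuple order) having that prefix.  Since the tuple lists every
-- # version before its extensions, an exact version name maps to itself.
-- _prefix_map = {}
-- for _v in all_versions:
-- 	for _i in range(1, len(_v) + 1):
-- 		_prefix_map.setdefault(_v[:_i], _v)
--
-- def guess_version(text):
-- 	return _prefix_map.get(text.upper(), default_version)
-- ===== Notes on version B (the rewrite author's own statement) =====
-- stated objective: alternative
-- what changed: B precomputes once, with dict.setdefault, a map from every nonempty prefix of a version to the first version carrying that prefix (so exact names map to themselves, the tuple listing each version before its extensions), and each call is a single text.upper() dictionary lookup with default_version as fallback, replacing A's per-call membership test and startswith scan with break.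
import Mathlib
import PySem

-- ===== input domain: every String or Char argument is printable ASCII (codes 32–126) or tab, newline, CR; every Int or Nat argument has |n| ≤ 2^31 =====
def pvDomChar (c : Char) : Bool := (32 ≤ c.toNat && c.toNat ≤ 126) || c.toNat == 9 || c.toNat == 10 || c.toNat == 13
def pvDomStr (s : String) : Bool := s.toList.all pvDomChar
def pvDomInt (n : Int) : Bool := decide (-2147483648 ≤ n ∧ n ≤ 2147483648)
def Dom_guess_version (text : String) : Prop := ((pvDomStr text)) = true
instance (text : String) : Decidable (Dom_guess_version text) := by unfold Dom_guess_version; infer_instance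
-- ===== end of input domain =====

-- B replaces A's per-call scan (membership test + startswith loop with break) by a
-- prefix→version dictionary precomputed once with setdefault, so each call is a single lookup.

-- shared module constants
def all_versions : List String :=
  ["AMP", "ASV", "BOOKS", "CEB", "CEV", "CEV", "CEVUK", "CPDV", "DARBY",
   "DRA", "ESV", "ERV", "GNB", "GNBDC", "GNBDK", "GNT", "GNTD", "GWT",
   "HCSB", "ISR98", "KJV", "LEB", "MSG", "NIV", "NIVUK", "NLT", "NET",
   "NKJV", "NCV", "NASB", "NABRE", "NIRV", "OJB", "RV1885", "TLV", "WEB"]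

def default_version : String := "NIV"

-- ===== PORT A =====
-- A's for-loop with break, carrying version_guess as the accumulator
def guessLoopA : List String → String → String → String
  | [], _, guess => guess
  | v :: rest, t, guess =>
      if PySem.Str.startswith v t then v else guessLoopA rest t guess

def guess_version (text : String) : String :=
  let t := PySem.Str.upper text
  if all_versions.contains t then t
  else
    if t ≠ "" then guessLoopA all_versions t default_version
    else default_version

-- ===== PORT B =====
-- module-level build loop of Source B: for v in all_versions: for i in range(1, len(v)+1): map.setdefault(v[:i], v)
def prefix_map : PySem.Dict String String :=
  all_versions.foldl
    (fun d v =>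
      (PySem.List.pyRange 1 (PySem.Str.len v + 1) 1).foldl
        (fun d i => d.setdefault (PySem.Str.slice v none (some i)) v) d)
    PySem.Dict.empty

def guess_version_alt (text : String) : String :=
  prefix_map.getD (PySem.Str.upper text) default_version

-- ===== PRECONDITION & SPEC =====
def Spec_guess_version (text : String) (out : String) : Prop := out = guess_version_alt text
instance (text : String) (out : String) : Decidable (Spec_guess_version text out) := by unfold Spec_guess_version; infer_instance

-- ===== CLAIM (what is proved, stated in full; the proofs are below) =====
def Claim_equal_guess_version : Prop := ∀ (text : String), Dom_guess_version text → Spec_guess_version text (guess_version text)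

-- ===== LEMMAS AND PROOFS =====

-- the pairs (v[:i], v), i = 1..len(v), contributed by one version
def prefixPairs (v : String) : List (String × String) :=
  (PySem.List.pyRange 1 (PySem.Str.len v + 1) 1).map
    (fun i => (PySem.Str.slice v none (some i), v))

-- the nested build loop is the flat setdefault fold over all contributed pairs
theorem prefix_map_eq_flat :
    prefix_map = (all_versions.flatMap prefixPairs).foldl
      (fun d p => d.setdefault p.1 p.2) PySem.Dict.empty := by
  simp [prefix_map, List.foldl_flatMap, prefixPairs, List.foldl_map]

-- lookup in a setdefault-fold is the FIRST pair with the key (or the old binding)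
theorem get?_foldl_setdefault (ps : List (String × String))
    (d : PySem.Dict String String) (t : String) :
    (ps.foldl (fun d p => d.setdefault p.1 p.2) d).get? t
      = (d.get? t).or ((ps.find? (fun p => p.1 == t)).map Prod.snd) := by
  induction ps generalizing d with
  | nil => simp
  | cons p ps ih =>
      rw [List.foldl_cons, ih]
      by_cases h : p.1 = t
      · subst h
        rw [PySem.Dict.get?_setdefault_self]
        cases hd : d.get? p.1 <;> simp [List.find?]
      · rw [PySem.Dict.get?_setdefault_of_ne _ _ (Ne.symm h)]
        have hb : (p.1 == t) = false := beq_eq_false_iff_ne.mpr h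
        simp [List.find?, hb]

-- a key v[:(1+k)] is the take of v's character list
theorem toList_slice_take (v : String) (k : Nat) :
    (PySem.Str.slice v none (some (1 + (k : Int)))).toList = v.toList.take (k + 1) := by
  rw [PySem.Str.toList_slice, PySem.Chars.slice_eq_listSlice]
  rw [show ((1:Int) + (k:Int)) = ((k + 1 : Nat) : Int) by push_cast; ring]
  rw [PySem.List.slice_to_natCast]

-- find? over range n of a predicate that holds exactly at j
theorem find?_range_unique (n j : Nat) (q : Nat → Bool) (hj : j < n)
    (hq : ∀ k, k < n → (q k = true ↔ k = j)) :
    (List.range n).find? q = some j := by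
  induction n with
  | zero => omega
  | succ n ih =>
      rw [List.range_succ, List.find?_append]
      by_cases h : j < n
      · rw [ih h (fun k hk => hq k (by omega))]; rfl
      · have hjn : j = n := by omega
        have h1 : (List.range n).find? q = none := by
          rw [List.find?_eq_none]
          intro k hk
          simp only [List.mem_range] at hk
          intro hc
          exact absurd ((hq k (by omega)).mp hc) (by omega)
        rw [h1, hjn]
        simp [List.find?, (hq n (by omega)).mpr hjn.symm]

-- one version's block matches t exactly when t is a nonempty prefix of v,
-- and then the matching pair is (t, v)
theorem find?_prefixPairs (v t : String) :
    (prefixPairs v).find? (fun p => p.1 == t)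
      = if t.toList ≠ [] ∧ t.toList <+: v.toList then some (t, v) else none := by
  have hn : ((PySem.Str.len v + 1 - 1 : Int)).toNat = v.toList.length := by
    simp [PySem.Str.len_eq]
  unfold prefixPairs
  rw [PySem.List.pyRange_one, List.map_map, List.find?_map, hn]
  by_cases hp : t.toList ≠ [] ∧ t.toList <+: v.toList
  · rw [if_pos hp]
    obtain ⟨hne, hpre⟩ := hp
    have hm1 : 1 ≤ t.toList.length := by
      cases hl : t.toList with
      | nil => exact absurd hl hne
      | cons a l => simp
    have hmn : t.toList.length ≤ v.toList.length := hpre.length_le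
    rw [find?_range_unique v.toList.length (t.toList.length - 1) _ (by omega)]
    swap
    · intro k hk
      simp only [Function.comp, beq_iff_eq, ← String.toList_inj, toList_slice_take]
      constructor
      · intro h
        have hlen : (v.toList.take (k + 1)).length = t.toList.length := by rw [h]
        rw [List.length_take] at hlen
        omega
      · intro h
        have hk1 : k + 1 = t.toList.length := by omega
        rw [hk1, ← List.prefix_iff_eq_take.mp hpre]
    · simp only [Option.map_some, Function.comp]
      have hs : (PySem.Str.slice v none (some (1 + ((t.toList.length - 1 : Nat) : Int)))).toList
          = t.toList := by
        rw [toList_slice_take]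
        have : t.toList.length - 1 + 1 = t.toList.length := by omega
        rw [this, ← List.prefix_iff_eq_take.mp hpre]
      exact congrArg _ (Prod.ext (String.toList_inj.mp hs) rfl)
  · rw [if_neg hp, Option.map_eq_none_iff, List.find?_eq_none]
    intro k hk
    simp only [List.mem_range] at hk
    simp only [Function.comp, beq_iff_eq, ← String.toList_inj, toList_slice_take]
    intro hc
    apply hp
    constructor
    · rw [← hc]
      apply List.ne_nil_of_length_pos
      rw [List.length_take]
      omega
    · rw [← hc]; exact List.take_prefix _ _

-- the first matching pair over all versions is (t, first version with prefix t)
theorem find?_flat (l : List String) (t : String) :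
    ((l.flatMap prefixPairs).find? (fun p => p.1 == t))
      = if t = "" then none
        else (l.find? (fun v => PySem.Str.startswith v t)).map (fun v => (t, v)) := by
  induction l with
  | nil => by_cases h : t = "" <;> simp [h]
  | cons v l ih =>
      rw [List.flatMap_cons, List.find?_append, find?_prefixPairs, ih]
      by_cases he : t = ""
      · subst he
        simp
      · have hne : t.toList ≠ [] := by
          intro h
          exact he (String.toList_inj.mp h)
        by_cases hpre : t.toList <+: v.toList
        · have hsw : PySem.Chars.startswith v.toList t.toList = true :=
            (PySem.Chars.startswith_iff _ _).mpr hpre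
          simp [hne, hpre, he, List.find?, hsw]
        · have hsw : PySem.Chars.startswith v.toList t.toList = false := by
            cases h : PySem.Chars.startswith v.toList t.toList with
            | false => rfl
            | true => exact absurd ((PySem.Chars.startswith_iff _ _).mp h) hpre
          simp [hpre, he, List.find?, hsw]


-- abbreviation used only by the lemmas
def l_find (t : String) : Option String :=
  all_versions.find? (fun v => PySem.Str.startswith v t)

-- B's dictionary lookup, characterised: first version having t as a prefix
theorem prefix_map_get? (t : String) :
    prefix_map.get? t
      = if t = "" then none
        else l_find t := by
  rw [prefix_map_eq_flat, get?_foldl_setdefault, find?_flat, PySem.Dict.get?_empty]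
  by_cases he : t = "" <;> simp [he, l_find, Option.map_map]

-- A's break-loop is the first match (or the untouched accumulator)
theorem guessLoopA_eq_find? (l : List String) (t g : String) :
    guessLoopA l t g = (l.find? (fun v => PySem.Str.startswith v t)).getD g := by
  induction l with
  | nil => rfl
  | cons v rest ih =>
      cases h : PySem.Chars.startswith v.toList t.toList <;>
        simp [guessLoopA, List.find?, PySem.Str.startswith, h, ih]

-- each version is listed before all of its extensions, so the first startswith hit
-- at an exact-match input is the exact match itself
theorem find?_of_mem (t : String) (hm : t ∈ all_versions) :
    (all_versions.find? (fun v => PySem.Str.startswith v t)).getD default_version = t := by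
  fin_cases hm <;> decide

-- ===== VERDICT (by name: the statement is the Claim_ definition above) =====
-- A's result equals B's lookup result, for any (uppercased) input t
theorem key_eq (t : String) :
    (if all_versions.contains t then t
     else if t ≠ "" then guessLoopA all_versions t default_version
     else default_version)
    = (if t = "" then none else l_find t).getD default_version := by
  by_cases he : t = ""
  · subst he; decide
  · rw [if_neg he]
    by_cases hc : all_versions.contains t = true
    · have hm : t ∈ all_versions := by simpa using hc
      rw [if_pos hc]
      exact (find?_of_mem t hm).symm
    · rw [if_neg hc, if_pos he, guessLoopA_eq_find?]
      rfl

theorem guess_version_spec : Claim_equal_guess_version := by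
  intro text _
  unfold Spec_guess_version guess_version guess_version_alt
  rw [PySem.Dict.getD_eq_get?_getD, prefix_map_get?]
  exact key_eq (PySem.Str.upper text)
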